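-- pv_equiv track=rewrite | github.com/raaachli/ProcessGAN | nets/process_gan.py | reverse_to_list
-- ===== SOURCE A (Python) =====
-- def reverse_to_list(seqs, vocab_num):
--     result = []
--     for seq in seqs:
--         seq_i = []
--         for i in seq:
--             if i != vocab_num:
--                 seq_i.append(i+1)
--             else:
--                 break
--         result.append(seq_i)
--     return result
-- ===== SOURCE B (Python) =====
-- def reverse_to_list(seqs, vocab_num):
--     result = []
--     for seq in seqs:
--         try:
--             idx = seq.index(vocab_num)
--         except ValueError:
--             idx = len(seq)
--         result.append([x + 1 for x in seq[:idx]])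
--     return result
-- ===== Notes on version B (the rewrite author's own statement) =====
-- stated objective: idiomatic
-- what changed: B first locates the sentinel with seq.index (falling back to len(seq) when absent) and then maps +1 over the slice before it, instead of A's element-by-element copy loop with a break.
import Mathlib
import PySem

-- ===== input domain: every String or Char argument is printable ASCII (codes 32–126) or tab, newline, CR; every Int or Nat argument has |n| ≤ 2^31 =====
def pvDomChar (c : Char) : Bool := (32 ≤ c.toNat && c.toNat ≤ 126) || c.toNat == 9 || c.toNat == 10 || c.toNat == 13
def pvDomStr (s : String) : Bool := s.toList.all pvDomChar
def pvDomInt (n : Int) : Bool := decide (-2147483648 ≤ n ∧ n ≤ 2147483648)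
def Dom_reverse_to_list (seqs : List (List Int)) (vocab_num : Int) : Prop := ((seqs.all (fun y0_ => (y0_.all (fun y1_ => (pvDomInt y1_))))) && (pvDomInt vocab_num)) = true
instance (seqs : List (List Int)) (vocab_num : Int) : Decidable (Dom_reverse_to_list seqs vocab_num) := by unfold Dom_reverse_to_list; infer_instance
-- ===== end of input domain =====

-- B computes the cut point with index/len and maps +1 over the slice, instead of A's copy loop with a break (idiomatic; same cost).

-- ===== PORT A =====
-- inner 'for i in seq: … break' loop of A
def pvInnerA (vocab_num : Int) (seq : List Int) (seq_i : List Int) : List Int :=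
  match seq with
  | [] => seq_i
  | i :: rest => if i ≠ vocab_num then pvInnerA vocab_num rest (seq_i ++ [i + 1]) else seq_i

def reverse_to_list (seqs : List (List Int)) (vocab_num : Int) : List (List Int) :=
  seqs.foldl (fun result seq => result ++ [pvInnerA vocab_num seq []]) []

-- ===== PORT B =====
-- per-seq: idx = seq.index(vocab_num) (or len(seq) on ValueError); [x+1 for x in seq[:idx]]
def pvCutB (vocab_num : Int) (seq : List Int) : List Int :=
  let idx : Nat := (PySem.List.index? seq vocab_num).getD seq.length
  (PySem.List.slice seq none (some (idx : Int))).map (fun x => x + 1)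

def reverse_to_list_alt (seqs : List (List Int)) (vocab_num : Int) : List (List Int) :=
  seqs.foldl (fun result seq => result ++ [pvCutB vocab_num seq]) []

-- ===== PRECONDITION & SPEC =====
def Spec_reverse_to_list (seqs : List (List Int)) (vocab_num : Int) (out : List (List Int)) : Prop := out = reverse_to_list_alt seqs vocab_num
instance (seqs : List (List Int)) (vocab_num : Int) (out : List (List Int)) : Decidable (Spec_reverse_to_list seqs vocab_num out) := by unfold Spec_reverse_to_list; infer_instance

-- ===== CLAIM (what is proved, stated in full; the proofs are below) =====
def Claim_equal_reverse_to_list : Prop := ∀ (seqs : List (List Int)) (vocab_num : Int), Dom_reverse_to_list seqs vocab_num → Spec_reverse_to_list seqs vocab_num (reverse_to_list seqs vocab_num)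

-- ===== LEMMAS AND PROOFS =====

theorem pvInnerA_acc (vocab_num : Int) (seq : List Int) (acc : List Int) :
    pvInnerA vocab_num seq acc = acc ++ pvInnerA vocab_num seq [] := by
  induction seq generalizing acc with
  | nil => simp [pvInnerA]
  | cons i rest ih =>
    by_cases h : i = vocab_num
    · simp [pvInnerA, h]
    · rw [pvInnerA, pvInnerA, if_pos h, if_pos h, ih (acc ++ [i + 1]), ih ([] ++ [i + 1])]
      simp

theorem pvCutB_eq_take (v : Int) (seq : List Int) :
    pvCutB v seq = (seq.take ((PySem.List.index? seq v).getD seq.length)).map (fun x => x + 1) := by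
  show (PySem.List.slice seq none (some (((PySem.List.index? seq v).getD seq.length : Nat) : Int))).map
      (fun x => x + 1) = _
  rw [PySem.List.slice_to_natCast]

theorem pvInner_eq_cut (vocab_num : Int) (seq : List Int) :
    pvInnerA vocab_num seq [] = pvCutB vocab_num seq := by
  induction seq with
  | nil => rw [pvCutB_eq_take]; rfl
  | cons i rest ih =>
    rw [pvCutB_eq_take]
    by_cases h : i = vocab_num
    · subst h
      rw [PySem.List.index?_cons_self]
      simp [pvInnerA]
    · rw [pvInnerA, if_pos h, pvInnerA_acc, ih, pvCutB_eq_take,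
        PySem.List.index?_cons_of_ne rest h]
      cases hidx : PySem.List.index? rest vocab_num with
      | none => simp
      | some k => simp

-- ===== VERDICT (by name: the statement is the Claim_ definition above) =====
theorem reverse_to_list_spec : Claim_equal_reverse_to_list := by
  intro seqs vocab_num _
  unfold Spec_reverse_to_list reverse_to_list reverse_to_list_alt
  clear ‹Dom_reverse_to_list seqs vocab_num›
  induction seqs using List.reverseRecOn with
  | nil => rfl
  | append_singleton xs x ih =>
    rw [List.foldl_append, List.foldl_append, List.foldl_cons, List.foldl_cons,
      List.foldl_nil, List.foldl_nil, ih, pvInner_eq_cut]
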